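-- pv_equiv track=rewrite | github.com/Droptop-Four/Droptop-Four-Discord-Bot | utils/name_validator.py | get_title_author
-- ===== SOURCE A (Python) =====
-- def get_title_author(type, name):
--     """
--     Separates the title and the author from the name.
--
--     Args:
--             type (str): The type of package [app, theme]
--             name (str): The name of the package
--
--     Returns:
--             title (str): The title of the package
--             author (str): The author of the package
--     """
--
--     lista = name.split("_-_")
--     lista2 = []
--     lista3 = []
--
--     for element in lista:
--         if "_Droptop_App.rmskin" in element:
--             element = element.replace("_Droptop_App.rmskin", "")
--             lista2.append(element)
--         elif "_Droptop_Theme.rmskin" in element: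
--             element = element.replace("_Droptop_Theme.rmskin", "")
--             lista2.append(element)
--         else:
--             lista2.append(element)
--
--     for element in lista2:
--         element = element.replace("_", " ")
--         lista3.append(element)
--
--     title = lista3[0]
--     author = lista3[1]
--
--     return title, author
-- ===== SOURCE B (Python) =====
-- def _clean(el):
--     """Remove the first matching package tag, then turn underscores into spaces."""
--     for tag in ("_Droptop_App.rmskin", "_Droptop_Theme.rmskin"):
--         if tag in el:
--             el = el.replace(tag, "")
--             break
--     return el.replace("_", " ")
--
--
-- def get_title_author(type, name):
--     """Locate the separators by index arithmetic; no list of parts is ever built."""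
--     sep = "_-_"
--     i = name.index(sep)
--     title = name[:i]
--     rest = name[i + len(sep):]
--     j = rest.find(sep)
--     author = rest if j < 0 else rest[:j]
--     return _clean(title), _clean(author)
-- ===== Notes on version B (the rewrite author's own statement) =====
-- stated objective: simpler
-- what changed: B never builds the split list or the two accumulator lists: it locates the two separators with index/find and slices title and author out of the name directly, cleaning only those two strings with a for/break loop over the tag tuple.
import Mathlib
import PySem

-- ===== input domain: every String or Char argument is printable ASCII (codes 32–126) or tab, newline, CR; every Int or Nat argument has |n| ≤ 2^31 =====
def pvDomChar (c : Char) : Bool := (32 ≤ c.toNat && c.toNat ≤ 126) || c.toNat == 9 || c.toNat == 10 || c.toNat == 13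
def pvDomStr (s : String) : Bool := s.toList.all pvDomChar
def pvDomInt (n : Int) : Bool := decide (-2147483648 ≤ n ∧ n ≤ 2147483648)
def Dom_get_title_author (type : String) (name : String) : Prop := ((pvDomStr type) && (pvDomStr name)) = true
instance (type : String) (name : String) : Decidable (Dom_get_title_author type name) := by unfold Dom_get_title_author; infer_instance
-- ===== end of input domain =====

-- B locates the two separators by index arithmetic (index/find + slicing) instead of splitting into a list and running two accumulating loops; objective: simpler.

-- ===== PORT A =====
def get_title_author (type : String) (name : String) : String × String :=
  let lista := (PySem.Str.split? name "_-_").getD []  -- sep is the nonempty literal "_-_", so split? is always some: getD is exact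
  let lista2 := lista.foldl (fun acc element =>
    if PySem.Str.isIn "_Droptop_App.rmskin" element then
      acc ++ [PySem.Str.replace element "_Droptop_App.rmskin" ""]
    else if PySem.Str.isIn "_Droptop_Theme.rmskin" element then
      acc ++ [PySem.Str.replace element "_Droptop_Theme.rmskin" ""]
    else
      acc ++ [element]) []
  let lista3 := lista2.foldl (fun acc element => acc ++ [PySem.Str.replace element "_" " "]) []
  let title := PySem.List.pyGetD lista3 0 ""   -- lista3[0]; in range under Pre_
  let author := PySem.List.pyGetD lista3 1 ""  -- lista3[1]; in range under Pre_
  (title, author)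

-- ===== PORT B =====
-- port of Source B's `for tag in (...): if tag in el: el = el.replace(tag, ""); break`
def pvCleanLoop : List String → String → String
  | [], el => el
  | tag :: rest, el =>
      if PySem.Str.isIn tag el then PySem.Str.replace el tag "" else pvCleanLoop rest el

def pvClean (el : String) : String :=
  PySem.Str.replace (pvCleanLoop ["_Droptop_App.rmskin", "_Droptop_Theme.rmskin"] el) "_" " "

def get_title_author_alt (type : String) (name : String) : String × String :=
  -- name.index(sep): Python raises ValueError when sep is absent (i = -1); those inputs are outside Pre_
  let i := PySem.Str.find name "_-_"
  let title := PySem.Str.slice name none (some i)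
  let rest := PySem.Str.slice name (some (i + PySem.Str.len "_-_")) none
  let j := PySem.Str.find rest "_-_"
  let author := if j < 0 then rest else PySem.Str.slice rest none (some j)
  (pvClean title, pvClean author)

-- ===== PRECONDITION & SPEC =====
-- Pre_ excludes exactly the names in which "_-_" does not occur: there the split has one part and A raises IndexError at lista3[1].
def Pre_get_title_author (type : String) (name : String) : Prop :=
  PySem.Str.isIn "_-_" name = true
instance (type : String) (name : String) : Decidable (Pre_get_title_author type name) := by unfold Pre_get_title_author; infer_instance
def pvWitness_get_title_author : String × String := ("app", "Cool_App_-_Jane_Droptop_App.rmskin")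

def Spec_get_title_author (type : String) (name : String) (out : String × String) : Prop := out = get_title_author_alt type name
instance (type : String) (name : String) (out : String × String) : Decidable (Spec_get_title_author type name out) := by unfold Spec_get_title_author; infer_instance

-- ===== CLAIM (what is proved, stated in full; the proofs are below) =====
def Claim_equal_get_title_author : Prop := ∀ (type : String) (name : String), Dom_get_title_author type name → Pre_get_title_author type name → Spec_get_title_author type name (get_title_author type name)

-- ===== LEMMAS AND PROOFS =====

-- one-step unfoldings of PySem.Chars.splitOn.go
theorem pv_go_cons (sep : List Char) (fuel : Nat) (c : Char) (rest cur : List Char) (accs : List (List Char)) :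
    PySem.Chars.splitOn.go sep (fuel+1) (c :: rest) cur accs =
      if sep.isPrefixOf (c :: rest) then
        PySem.Chars.splitOn.go sep fuel (List.drop sep.length (c :: rest)) [] (cur.reverse :: accs)
      else PySem.Chars.splitOn.go sep fuel rest (c :: cur) accs := by
  rw [PySem.Chars.splitOn.go]

theorem pv_go_nil (sep cur : List Char) (accs : List (List Char)) (fuel : Nat) :
    PySem.Chars.splitOn.go sep (fuel+1) [] cur accs = (cur.reverse :: accs).reverse := by
  rw [PySem.Chars.splitOn.go]; omega

-- accumulator invariant of go: any sufficient fuel computes splitOn, with cur prefixed onto the first part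
theorem pv_go_spec (sep : List Char) (hsep : sep ≠ []) :
    ∀ fuel (l cur : List Char) (accs : List (List Char)), l.length < fuel →
      PySem.Chars.splitOn.go sep fuel l cur accs =
        accs.reverse ++ (PySem.Chars.splitOn l sep).modifyHead (cur.reverse ++ ·) := by
  intro fuel
  induction fuel using Nat.strong_induction_on with
  | _ fuel ih =>
    intro l cur accs hlen
    match fuel, l with
    | fuel+1, [] =>
      rw [pv_go_nil]
      unfold PySem.Chars.splitOn
      rw [pv_go_nil]
      simp
    | fuel+1, c :: rest =>
      have hsl : 1 ≤ sep.length := List.length_pos_iff.mpr hsep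
      have hlen' : rest.length + 1 < fuel + 1 := by simpa using hlen
      have hdrop : (List.drop sep.length (c :: rest)).length < fuel := by
        simp only [List.length_drop, List.length_cons]; omega
      have hdrop' : (List.drop sep.length (c :: rest)).length < rest.length + 1 := by
        simp only [List.length_drop, List.length_cons]; omega
      rw [pv_go_cons]
      by_cases hp : sep.isPrefixOf (c :: rest) = true
      · rw [if_pos hp, ih fuel (by omega) _ _ _ hdrop]
        conv_rhs => rw [PySem.Chars.splitOn]
        rw [show (c :: rest).length + 1 = (rest.length + 1) + 1 from by simp,
            pv_go_cons, if_pos hp, ih (rest.length + 1) (by omega) _ _ _ hdrop']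
        cases PySem.Chars.splitOn (List.drop sep.length (c :: rest)) sep <;> simp
      · rw [if_neg hp, ih fuel (by omega) _ _ _ (by omega)]
        conv_rhs => rw [PySem.Chars.splitOn]
        rw [show (c :: rest).length + 1 = (rest.length + 1) + 1 from by simp,
            pv_go_cons, if_neg hp, ih (rest.length + 1) (by omega) _ _ _ (by omega)]
        cases PySem.Chars.splitOn rest sep <;> simp

-- index of the first occurrence of sep in l (meaningful when sep occurs)
def pvFidx (sep : List Char) : List Char → Nat
  | [] => 0
  | c :: rest => if sep.isPrefixOf (c :: rest) then 0 else pvFidx sep rest + 1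

theorem pv_splitOn_nil (sep : List Char) : PySem.Chars.splitOn [] sep = [[]] := by
  unfold PySem.Chars.splitOn; rw [pv_go_nil]; simp

theorem pv_splitOn_cons_pos (sep : List Char) (hsep : sep ≠ []) (c : Char) (rest : List Char)
    (hp : sep.isPrefixOf (c :: rest) = true) :
    PySem.Chars.splitOn (c :: rest) sep =
      [] :: PySem.Chars.splitOn (List.drop sep.length (c :: rest)) sep := by
  have hsl : 1 ≤ sep.length := List.length_pos_iff.mpr hsep
  rw [PySem.Chars.splitOn, show (c :: rest).length + 1 = (rest.length + 1) + 1 from by simp,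
      pv_go_cons, if_pos hp,
      pv_go_spec sep hsep _ _ _ _ (by simp only [List.length_drop, List.length_cons]; omega)]
  cases PySem.Chars.splitOn (List.drop sep.length (c :: rest)) sep <;> simp

theorem pv_splitOn_cons_neg (sep : List Char) (hsep : sep ≠ []) (c : Char) (rest : List Char)
    (hp : ¬ sep.isPrefixOf (c :: rest) = true) :
    PySem.Chars.splitOn (c :: rest) sep =
      (PySem.Chars.splitOn rest sep).modifyHead (c :: ·) := by
  rw [PySem.Chars.splitOn, show (c :: rest).length + 1 = (rest.length + 1) + 1 from by simp,
      pv_go_cons, if_neg hp, pv_go_spec sep hsep _ _ _ _ (by omega)]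
  cases PySem.Chars.splitOn rest sep <;> simp

theorem pv_splitOn_not_infix (sep : List Char) (hsep : sep ≠ []) :
    ∀ l : List Char, ¬ sep <:+: l → PySem.Chars.splitOn l sep = [l] := by
  intro l
  induction l with
  | nil => intro _; exact pv_splitOn_nil sep
  | cons c rest ih =>
    intro h
    have hp : ¬ sep.isPrefixOf (c :: rest) = true := by
      intro hp; exact h (List.IsPrefix.isInfix (List.isPrefixOf_iff_prefix.mp hp))
    have hr : ¬ sep <:+: rest := fun hi => h (hi.trans (List.suffix_cons c rest).isInfix)
    rw [pv_splitOn_cons_neg sep hsep c rest hp, ih hr]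
    rfl

-- the split recursion: first part up to the first occurrence, then split the remainder
theorem pv_splitOn_infix (sep : List Char) (hsep : sep ≠ []) :
    ∀ l : List Char, sep <:+: l →
      PySem.Chars.splitOn l sep =
        l.take (pvFidx sep l) :: PySem.Chars.splitOn (l.drop (pvFidx sep l + sep.length)) sep := by
  intro l
  induction l with
  | nil => intro h; exact absurd (List.eq_nil_of_infix_nil h) hsep
  | cons c rest ih =>
    intro h
    by_cases hp : sep.isPrefixOf (c :: rest) = true
    · rw [pv_splitOn_cons_pos sep hsep c rest hp]
      simp [pvFidx, hp]
    · have hr : sep <:+: rest := by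
        rcases List.infix_cons_iff.mp h with hpre | hi
        · exact absurd (List.isPrefixOf_iff_prefix.mpr hpre) hp
        · exact hi
      rw [pv_splitOn_cons_neg sep hsep c rest hp, ih hr]
      simp only [List.modifyHead, pvFidx, hp, if_false, Bool.false_eq_true]
      rw [show pvFidx sep rest + 1 + sep.length = (pvFidx sep rest + sep.length) + 1 from by omega,
          List.drop_succ_cons, List.take_succ_cons]

theorem pv_fidx_spec (sep : List Char) (hsep : sep ≠ []) :
    ∀ l : List Char, sep <:+: l →
      sep <+: l.drop (pvFidx sep l) ∧ ∀ m < pvFidx sep l, ¬ sep <+: l.drop m := by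
  intro l
  induction l with
  | nil => intro h; exact absurd (List.eq_nil_of_infix_nil h) hsep
  | cons c rest ih =>
    intro h
    by_cases hp : sep.isPrefixOf (c :: rest) = true
    · refine ⟨?_, ?_⟩
      · simpa [pvFidx, hp] using List.isPrefixOf_iff_prefix.mp hp
      · simp [pvFidx, hp]
    · have hr : sep <:+: rest := by
        rcases List.infix_cons_iff.mp h with hpre | hi
        · exact absurd (List.isPrefixOf_iff_prefix.mpr hpre) hp
        · exact hi
      obtain ⟨h1, h2⟩ := ih hr
      refine ⟨?_, ?_⟩
      · simpa [pvFidx, hp] using h1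
      · intro m hm
        cases m with
        | zero =>
          simpa using fun hpre => hp (List.isPrefixOf_iff_prefix.mpr hpre)
        | succ m' =>
          have : m' < pvFidx sep rest := by simp [pvFidx, hp] at hm; omega
          simpa using h2 m' this

-- Chars.find points at the same first occurrence as pvFidx
theorem pv_find_toNat (sep l : List Char) (hsep : sep ≠ []) (h : sep <:+: l) :
    (PySem.Chars.find l sep).toNat = pvFidx sep l := by
  have hnn : 0 ≤ PySem.Chars.find l sep := (PySem.Chars.find_nonneg_iff l sep).mpr h
  obtain ⟨hf1, hf2⟩ := PySem.Chars.find_spec hnn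
  obtain ⟨hg1, hg2⟩ := pv_fidx_spec sep hsep l h
  rcases lt_trichotomy (PySem.Chars.find l sep).toNat (pvFidx sep l) with hlt | heq | hgt
  · exact absurd hf1 (hg2 _ hlt)
  · exact heq
  · exact absurd hg1 (hf2 _ hgt)

-- A's first loop is a map of the if/elif body (= pvCleanLoop over Source B's tag tuple)
theorem pv_loop1 (xs : List String) (acc : List String) :
    xs.foldl (fun acc element =>
      if PySem.Str.isIn "_Droptop_App.rmskin" element then
        acc ++ [PySem.Str.replace element "_Droptop_App.rmskin" ""]
      else if PySem.Str.isIn "_Droptop_Theme.rmskin" element then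
        acc ++ [PySem.Str.replace element "_Droptop_Theme.rmskin" ""]
      else
        acc ++ [element]) acc
      = acc ++ xs.map (pvCleanLoop ["_Droptop_App.rmskin", "_Droptop_Theme.rmskin"]) := by
  induction xs generalizing acc with
  | nil => simp
  | cons x xs ih =>
    simp only [List.foldl_cons, List.map_cons, ih, pvCleanLoop]
    split_ifs <;> simp

theorem get_title_author_spec' (type name : String)
    (hpre : Pre_get_title_author type name) :
    get_title_author type name = get_title_author_alt type name := by
  unfold Pre_get_title_author at hpre
  have hinf : ("_-_" : String).toList <:+: name.toList :=
    (PySem.Str.isIn_iff_infix "_-_" name).mp hpre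
  have hsep : ("_-_" : String).toList ≠ [] := by decide
  -- A reduced to indexing the mapped split
  unfold get_title_author get_title_author_alt
  simp only [pv_loop1, List.nil_append, PySem.List.foldl_append_singleton_eq_map, List.map_map]
  -- the split, via the recursion law
  have hxs : (PySem.Str.split? name "_-_").getD []
      = (PySem.Chars.splitOn name.toList ("_-_" : String).toList).map String.ofList := by
    simp [PySem.Str.split?, PySem.Chars.split?]
  set L := name.toList with hL
  set S := ("_-_" : String).toList with hS
  set f := pvFidx S L with hf
  set L' := L.drop (f + S.length) with hL'
  have hS3 : S.length = 3 := by decide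
  have hsplit : PySem.Chars.splitOn L S = L.take f :: PySem.Chars.splitOn L' S :=
    pv_splitOn_infix S hsep L hinf
  -- B's separator index is the same first occurrence
  have hnn : 0 ≤ PySem.Chars.find L S := (PySem.Chars.find_nonneg_iff L S).mpr hinf
  have htn : (PySem.Chars.find L S).toNat = f := pv_find_toNat S L hsep hinf
  have hiv : PySem.Str.find name "_-_" = (f : Int) := by
    rw [PySem.Str.find_eq, ← hL, ← hS]
    omega
  have hlen3 : PySem.Str.len "_-_" = (3 : Int) := by decide
  have htitle : PySem.Str.slice name none (some (PySem.Str.find name "_-_"))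
      = String.ofList (L.take f) := by
    apply String.toList_inj.mp
    rw [hiv, PySem.Str.toList_slice, PySem.Chars.slice_eq_listSlice, ← hL,
        PySem.List.slice_to_natCast]
    simp
  have hrest : PySem.Str.slice name (some (PySem.Str.find name "_-_" + PySem.Str.len "_-_")) none
      = String.ofList L' := by
    apply String.toList_inj.mp
    rw [hiv, hlen3, PySem.Str.toList_slice, PySem.Chars.slice_eq_listSlice, ← hL,
        show ((f : Int) + 3) = ((f + 3 : Nat) : Int) from by push_cast; ring,
        PySem.List.slice_from_natCast]
    simp [hL', hS3]
  rw [hxs, hsplit, hiv, hlen3, ← hiv, ← hlen3, htitle, hrest]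
  have hj : PySem.Str.find (String.ofList L') "_-_" = PySem.Chars.find L' S := by
    rw [PySem.Str.find_eq, ← hS]
    simp
  by_cases h2 : S <:+: L'
  · -- second separator present: author is L' up to its first occurrence
    set f' := pvFidx S L' with hf'
    have hsplit' : PySem.Chars.splitOn L' S = L'.take f' :: PySem.Chars.splitOn (L'.drop (f' + S.length)) S :=
      pv_splitOn_infix S hsep L' h2
    have hnn' : 0 ≤ PySem.Chars.find L' S := (PySem.Chars.find_nonneg_iff L' S).mpr h2
    have htn' : (PySem.Chars.find L' S).toNat = f' := pv_find_toNat S L' hsep h2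
    have hjv : PySem.Str.find (String.ofList L') "_-_" = (f' : Int) := by rw [hj]; omega
    have hnotlt : ¬ PySem.Str.find (String.ofList L') "_-_" < 0 := by rw [hjv]; omega
    have hauthor : PySem.Str.slice (String.ofList L') none (some (PySem.Str.find (String.ofList L') "_-_"))
        = String.ofList (L'.take f') := by
      apply String.toList_inj.mp
      rw [hjv, PySem.Str.toList_slice, PySem.Chars.slice_eq_listSlice,
          PySem.List.slice_to_natCast]
      simp
    rw [hsplit', if_neg hnotlt, hauthor]
    simp only [List.map_cons, PySem.List.pyGetD_ofNat']
    simp [pvClean]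
  · -- no second separator: author is all of L'
    have hsplit' : PySem.Chars.splitOn L' S = [L'] := pv_splitOn_not_infix S hsep L' h2
    have hjv : PySem.Str.find (String.ofList L') "_-_" = -1 := by
      rw [hj]; exact (PySem.Chars.find_eq_neg_one_iff L' S).mpr h2
    have hlt : PySem.Str.find (String.ofList L') "_-_" < 0 := by rw [hjv]; norm_num
    rw [hsplit', if_pos hlt]
    simp only [List.map_cons, PySem.List.pyGetD_ofNat']
    simp [pvClean]

-- ===== VERDICT (by name: the statement is the Claim_ definition above) =====
theorem get_title_author_spec : Claim_equal_get_title_author := by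
  intro type name _ hpre
  exact get_title_author_spec' type name hpre
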